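-- pv_equiv track=rewrite | github.com/Madushan234/Travel-Plan-Generator | places_service.py | determine_season
-- ===== SOURCE A (Python) =====
-- def determine_season(latitude, month):
--     northern_hemisphere_seasons = {
--         (12, 1, 2): "Winter",
--         (3, 4, 5): "Spring",
--         (6, 7, 8): "Summer",
--         (9, 10, 11): "Autumn"
--     }
--     southern_hemisphere_seasons = {
--         (12, 1, 2): "Summer",
--         (3, 4, 5): "Autumn",
--         (6, 7, 8): "Winter",
--         (9, 10, 11): "Spring"
--     }
--
--     if latitude >= 0:  # Northern Hemisphere
--         for months, season in northern_hemisphere_seasons.items():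
--             if month in months:
--                 return season
--     else:  # Southern Hemisphere
--         for months, season in southern_hemisphere_seasons.items():
--             if month in months:
--                 return season
--     return "Unknown"
-- ===== SOURCE B (Python) =====
-- def determine_season(latitude, month):
--     if month not in (1, 2, 3, 4, 5, 6, 7, 8, 9, 10, 11, 12):
--         return "Unknown"
--     idx = int((month % 12) // 3)
--     if latitude < 0:
--         idx = (idx + 2) % 4
--     return ["Winter", "Spring", "Summer", "Autumn"][idx]
-- ===== Notes on version B (the rewrite author's own statement) =====
-- stated objective: simpler
-- what changed: Replaces the two hemisphere dictionaries scanned tuple-by-tuple with a single 4-element season list indexed arithmetically by (month % 12) // 3, shifting the index by 2 mod 4 for the southern hemisphere.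
import Mathlib
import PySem

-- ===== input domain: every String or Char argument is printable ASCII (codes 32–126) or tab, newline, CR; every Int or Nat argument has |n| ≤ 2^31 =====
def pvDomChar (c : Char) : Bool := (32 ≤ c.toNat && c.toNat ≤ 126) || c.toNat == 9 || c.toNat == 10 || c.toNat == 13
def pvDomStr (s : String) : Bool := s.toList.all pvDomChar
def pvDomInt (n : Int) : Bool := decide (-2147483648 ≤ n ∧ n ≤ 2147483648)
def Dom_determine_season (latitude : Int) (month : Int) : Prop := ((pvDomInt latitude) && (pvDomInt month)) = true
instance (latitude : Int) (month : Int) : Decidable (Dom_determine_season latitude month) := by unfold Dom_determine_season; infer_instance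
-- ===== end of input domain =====

-- B replaces the tuple-group scan of two hemisphere dicts with a single 4-element
-- season list indexed arithmetically by (month % 12) // 3 (shifted by 2 mod 4 in the south): simpler.

-- ===== PORT A =====
-- A scans a dict keyed by 3-tuples of months; ported as a first-match scan over the
-- association list in insertion order ('month in months' = equality with one component).
def pvScanSeasons (tbl : List ((Int × Int × Int) × String)) (month : Int) : String :=
  match tbl with
  | [] => "Unknown"
  | ((a, b, c), season) :: rest =>
      if month = a ∨ month = b ∨ month = c then season else pvScanSeasons rest month

def determine_season (latitude : Int) (month : Int) : String :=
  let northern_hemisphere_seasons : List ((Int × Int × Int) × String) :=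
    [((12, 1, 2), "Winter"), ((3, 4, 5), "Spring"), ((6, 7, 8), "Summer"), ((9, 10, 11), "Autumn")]
  let southern_hemisphere_seasons : List ((Int × Int × Int) × String) :=
    [((12, 1, 2), "Summer"), ((3, 4, 5), "Autumn"), ((6, 7, 8), "Winter"), ((9, 10, 11), "Spring")]
  if latitude ≥ 0 then pvScanSeasons northern_hemisphere_seasons month
  else pvScanSeasons southern_hemisphere_seasons month

-- ===== PORT B =====
def determine_season_alt (latitude : Int) (month : Int) : String :=
  if ¬ (1 ≤ month ∧ month ≤ 12) then "Unknown"
  else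
    let idx := PySem.Int.floordiv (PySem.Int.mod month 12) 3
    let idx := if latitude < 0 then PySem.Int.mod (idx + 2) 4 else idx
    -- Python's seasons[idx] never goes out of range here; pyGet? with "" default is the total port
    (PySem.List.pyGet? ["Winter", "Spring", "Summer", "Autumn"] idx).getD ""

-- ===== PRECONDITION & SPEC =====
def Spec_determine_season (latitude : Int) (month : Int) (out : String) : Prop := out = determine_season_alt latitude month
instance (latitude : Int) (month : Int) (out : String) : Decidable (Spec_determine_season latitude month out) := by unfold Spec_determine_season; infer_instance

-- ===== CLAIM (what is proved, stated in full; the proofs are below) =====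
def Claim_equal_determine_season : Prop := ∀ (latitude : Int) (month : Int), Dom_determine_season latitude month → Spec_determine_season latitude month (determine_season latitude month)

-- ===== LEMMAS AND PROOFS =====

-- outside 1..12 both return "Unknown"
theorem both_unknown (latitude month : Int) (h : ¬ (1 ≤ month ∧ month ≤ 12)) :
    determine_season latitude month = determine_season_alt latitude month := by
  simp only [determine_season, determine_season_alt, pvScanSeasons, if_pos h]
  have h12 : month ≠ 12 := by omega
  split_ifs <;> simp_all <;> omega

-- ===== VERDICT (by name: the statement is the Claim_ definition above) =====
theorem determine_season_spec : Claim_equal_determine_season := by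
  unfold Claim_equal_determine_season Spec_determine_season
  intro latitude month _
  by_cases h : 1 ≤ month ∧ month ≤ 12
  · obtain ⟨h1, h2⟩ := h
    rcases lt_or_ge latitude 0 with hl | hl
    · interval_cases month <;>
        simp [determine_season, determine_season_alt, pvScanSeasons,
          PySem.Int.floordiv, PySem.Int.mod, PySem.List.pyGet?, PySem.List.pyIdx?,
          not_le.mpr hl, hl]
    · interval_cases month <;>
        simp [determine_season, determine_season_alt, pvScanSeasons,
          PySem.Int.floordiv, PySem.Int.mod, PySem.List.pyGet?, PySem.List.pyIdx?,
          hl, not_lt.mpr hl]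
  · exact both_unknown latitude month h
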